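-- pv_equiv track=rewrite | github.com/lumeida-tech/hirebox-data | prompt_file.py | _clean_cv_text
-- ===== SOURCE A (Python) =====
-- def _clean_cv_text(cv_text: str, max_chars: int = 12000) -> str:
--     """
--     Nettoie et tronque le texte du CV pour s'assurer qu'il reste
--     dans les limites du contexte du modèle.
--
--     Args:
--         cv_text  : Texte brut du CV.
--         max_chars: Nombre maximum de caractères autorisé (défaut : 12 000).
--
--     Returns:
--         Texte nettoyé et potentiellement tronqué.
--     """
--     # Suppression des espaces excessifs et lignes vides multiples
--     lines = [line.strip() for line in cv_text.splitlines()]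
--     cleaned_lines = []
--     prev_empty = False
--     for line in lines:
--         if line == "":
--             if not prev_empty:
--                 cleaned_lines.append(line)
--             prev_empty = True
--         else:
--             cleaned_lines.append(line)
--             prev_empty = False
--
--     cleaned = "\n".join(cleaned_lines).strip()
--
--     # Troncature si le CV est trop long
--     if len(cleaned) > max_chars:
--         cleaned = cleaned[:max_chars] + "\n[...CV tronqué pour respecter la limite de contexte...]"
--
--     return cleaned
-- ===== SOURCE B (Python) =====
-- def _clean_cv_text(cv_text: str, max_chars: int = 12000) -> str:
--     # Group non-empty stripped lines into paragraphs; blank-line runs become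
--     # paragraph breaks, so no prev_empty flag and no final strip are needed.
--     paragraphs = []
--     current = []
--     for raw in cv_text.splitlines():
--         line = raw.strip()
--         if line:
--             current.append(line)
--         elif current:
--             paragraphs.append("\n".join(current))
--             current = []
--     if current:
--         paragraphs.append("\n".join(current))
--
--     cleaned = "\n\n".join(paragraphs)
--
--     if len(cleaned) > max_chars:
--         cleaned = cleaned[:max_chars] + "\n[...CV tronqué pour respecter la limite de contexte...]"
--
--     return cleaned
-- ===== Notes on version B (the rewrite author's own statement) =====
-- stated objective: idiomatic
-- what changed: Replaces the prev_empty-flag pass that keeps one blank line per run (followed by a global strip) with a paragraph-grouping pass: non-empty stripped lines are collected into paragraphs at blank-line boundaries and the paragraphs are joined with a blank-line separator, needing no final strip.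
import Mathlib
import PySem

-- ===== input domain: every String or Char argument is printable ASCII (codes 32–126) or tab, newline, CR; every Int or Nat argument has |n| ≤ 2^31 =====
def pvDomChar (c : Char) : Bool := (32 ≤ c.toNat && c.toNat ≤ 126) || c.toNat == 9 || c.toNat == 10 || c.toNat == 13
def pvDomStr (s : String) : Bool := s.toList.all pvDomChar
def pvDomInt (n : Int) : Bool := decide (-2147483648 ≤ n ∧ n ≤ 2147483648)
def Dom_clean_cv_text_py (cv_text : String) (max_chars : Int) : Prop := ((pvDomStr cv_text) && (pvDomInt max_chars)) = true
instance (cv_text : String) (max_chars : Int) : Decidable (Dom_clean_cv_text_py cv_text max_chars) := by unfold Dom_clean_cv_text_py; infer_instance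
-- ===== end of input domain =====

-- B replaces A's prev_empty-flag blank-line dedup + final strip by grouping non-empty
-- stripped lines into paragraphs joined with a blank line (idiomatic; same results).

-- ===== PORT A =====
-- literal transliteration of _clean_cv_text: strip lines, keep one blank per run via a
-- prev_empty flag, join with '\n', strip, then truncate if longer than max_chars.
def clean_cv_text_py (cv_text : String) (max_chars : Int) : String :=
  let lines := (PySem.Chars.splitlines cv_text.toList).map PySem.Chars.strip
  let st := lines.foldl
    (fun (st : List (List Char) × Bool) line =>
      if line = [] then
        (if !st.2 then st.1 ++ [line] else st.1, true)
      else
        (st.1 ++ [line], false))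
    ([], false)
  let cleaned := PySem.Chars.strip (PySem.Chars.join ['\n'] st.1)
  if max_chars < (cleaned.length : Int) then
    String.ofList (PySem.List.slice cleaned none (some max_chars)
               ++ "\n[...CV tronqué pour respecter la limite de contexte...]".toList)
  else
    String.ofList cleaned

-- ===== PORT B =====
-- transliteration of Source B: collect non-empty stripped lines into paragraphs at
-- blank-line boundaries, join the paragraphs with '\n\n'; same truncation.
def clean_cv_text_py_alt (cv_text : String) (max_chars : Int) : String :=
  let st := (PySem.Chars.splitlines cv_text.toList).foldl
    (fun (st : List (List Char) × List (List Char)) raw =>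
      let line := PySem.Chars.strip raw
      if line ≠ [] then (st.1, st.2 ++ [line])
      else if st.2 ≠ [] then (st.1 ++ [PySem.Chars.join ['\n'] st.2], [])
      else st)
    ([], [])
  let paragraphs := if st.2 ≠ [] then st.1 ++ [PySem.Chars.join ['\n'] st.2] else st.1
  let cleaned := PySem.Chars.join ['\n', '\n'] paragraphs
  if max_chars < (cleaned.length : Int) then
    String.ofList (PySem.List.slice cleaned none (some max_chars)
               ++ "\n[...CV tronqué pour respecter la limite de contexte...]".toList)
  else
    String.ofList cleaned

-- ===== PRECONDITION & SPEC =====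
def Spec_clean_cv_text_py (cv_text : String) (max_chars : Int) (out : String) : Prop := out = clean_cv_text_py_alt cv_text max_chars
instance (cv_text : String) (max_chars : Int) (out : String) : Decidable (Spec_clean_cv_text_py cv_text max_chars out) := by unfold Spec_clean_cv_text_py; infer_instance

-- ===== CLAIM (what is proved, stated in full; the proofs are below) =====
def Claim_equal_clean_cv_text_py : Prop := ∀ (cv_text : String) (max_chars : Int), Dom_clean_cv_text_py cv_text max_chars → Spec_clean_cv_text_py cv_text max_chars (clean_cv_text_py cv_text max_chars)

-- ===== LEMMAS AND PROOFS =====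

-- a line is "clean": non-empty with non-whitespace first and last characters
def pvOk (l : List Char) : Prop :=
  l ≠ [] ∧ l.head?.all (fun c => !PySem.Chars.isspace c) = true
         ∧ l.getLast?.all (fun c => !PySem.Chars.isspace c) = true

-- recursion form of A's loop (cleaned_lines with the prev_empty flag)
def pvDedup : List (List Char) → Bool → List (List Char)
  | [], _ => []
  | l :: t, prev =>
    if l = [] then (if !prev then [l] else []) ++ pvDedup t true
    else l :: pvDedup t false

-- recursion form of B's loop (paragraphs, current group as accumulator)
def pvGrp : List (List Char) → List (List Char) → List (List Char)
  | [], cur => if cur ≠ [] then [PySem.Chars.join ['\n'] cur] else []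
  | l :: t, cur =>
    if l ≠ [] then pvGrp t (cur ++ [l])
    else if cur ≠ [] then PySem.Chars.join ['\n'] cur :: pvGrp t []
    else pvGrp t []

def pvOpt (e : Bool) : List Char := if e then ['\n'] else []

lemma pv_foldA (ls : List (List Char)) : ∀ acc prev,
    (ls.foldl
      (fun (st : List (List Char) × Bool) line =>
        if line = [] then
          (if !st.2 then st.1 ++ [line] else st.1, true)
        else
          (st.1 ++ [line], false))
      (acc, prev)).1 = acc ++ pvDedup ls prev := by
  induction ls with
  | nil => intro acc prev; simp [pvDedup]
  | cons l t ih =>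
    intro acc prev
    rw [List.foldl_cons, ih]
    by_cases hl : l = [] <;> by_cases hp : prev <;> simp [pvDedup, hl, hp]

lemma pv_foldB (raws : List (List Char)) : ∀ acc cur,
    (if (raws.foldl
          (fun (st : List (List Char) × List (List Char)) raw =>
            if PySem.Chars.strip raw ≠ [] then (st.1, st.2 ++ [PySem.Chars.strip raw])
            else if st.2 ≠ [] then (st.1 ++ [PySem.Chars.join ['\n'] st.2], [])
            else st)
          (acc, cur)).2 ≠ []
     then (raws.foldl
          (fun (st : List (List Char) × List (List Char)) raw =>
            if PySem.Chars.strip raw ≠ [] then (st.1, st.2 ++ [PySem.Chars.strip raw])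
            else if st.2 ≠ [] then (st.1 ++ [PySem.Chars.join ['\n'] st.2], [])
            else st)
          (acc, cur)).1
          ++ [PySem.Chars.join ['\n'] (raws.foldl
          (fun (st : List (List Char) × List (List Char)) raw =>
            if PySem.Chars.strip raw ≠ [] then (st.1, st.2 ++ [PySem.Chars.strip raw])
            else if st.2 ≠ [] then (st.1 ++ [PySem.Chars.join ['\n'] st.2], [])
            else st)
          (acc, cur)).2]
     else (raws.foldl
          (fun (st : List (List Char) × List (List Char)) raw =>
            if PySem.Chars.strip raw ≠ [] then (st.1, st.2 ++ [PySem.Chars.strip raw])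
            else if st.2 ≠ [] then (st.1 ++ [PySem.Chars.join ['\n'] st.2], [])
            else st)
          (acc, cur)).1)
    = acc ++ pvGrp (raws.map PySem.Chars.strip) cur := by
  induction raws with
  | nil => intro acc cur; by_cases hc : cur = [] <;> simp [pvGrp, hc]
  | cons raw t ih =>
    intro acc cur
    rw [List.foldl_cons]
    by_cases hl : PySem.Chars.strip raw = []
    · by_cases hc : cur = []
      · have hstep : (if PySem.Chars.strip raw ≠ [] then ((acc, cur).1, (acc, cur).2 ++ [PySem.Chars.strip raw])
            else if (acc, cur).2 ≠ [] then ((acc, cur).1 ++ [PySem.Chars.join ['\n'] (acc, cur).2], [])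
            else (acc, cur)) = (acc, cur) := by simp [hl, hc]
        rw [hstep, ih]
        simp [pvGrp, hl, hc]
      · have hstep : (if PySem.Chars.strip raw ≠ [] then ((acc, cur).1, (acc, cur).2 ++ [PySem.Chars.strip raw])
            else if (acc, cur).2 ≠ [] then ((acc, cur).1 ++ [PySem.Chars.join ['\n'] (acc, cur).2], [])
            else (acc, cur)) = (acc ++ [PySem.Chars.join ['\n'] cur], ([] : List (List Char))) := by simp [hl, hc]
        rw [hstep, ih]
        simp [pvGrp, hl, hc]
    · have hstep : (if PySem.Chars.strip raw ≠ [] then ((acc, cur).1, (acc, cur).2 ++ [PySem.Chars.strip raw])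
            else if (acc, cur).2 ≠ [] then ((acc, cur).1 ++ [PySem.Chars.join ['\n'] (acc, cur).2], [])
            else (acc, cur)) = (acc, cur ++ [PySem.Chars.strip raw]) := by simp [hl]
      rw [hstep, ih]
      simp [pvGrp, hl]

lemma pv_ok_strip (raw : List Char) :
    PySem.Chars.strip raw = [] ∨ pvOk (PySem.Chars.strip raw) := by
  by_cases hv : PySem.Chars.strip raw = []
  · exact Or.inl hv
  right
  have hs : PySem.Chars.strip raw
      = (List.dropWhile PySem.Chars.isspace
          (List.dropWhile PySem.Chars.isspace raw).reverse).reverse := rfl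
  have hvne : List.dropWhile PySem.Chars.isspace
      (List.dropWhile PySem.Chars.isspace raw).reverse ≠ [] := by
    intro h; apply hv; rw [hs, h]; rfl
  have hune : List.dropWhile PySem.Chars.isspace raw ≠ [] := by
    intro h; apply hvne; rw [h]; rfl
  refine ⟨hv, ?_, ?_⟩
  · rw [hs, List.head?_reverse]
    have hsuf := List.dropWhile_suffix (l := (List.dropWhile PySem.Chars.isspace raw).reverse)
      PySem.Chars.isspace
    obtain ⟨w, hw⟩ := hsuf
    obtain ⟨l', b, hcat⟩ := (List.dropWhile PySem.Chars.isspace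
      (List.dropWhile PySem.Chars.isspace raw).reverse).eq_nil_or_concat.resolve_left hvne
    rw [List.concat_eq_append] at hcat
    rw [hcat] at hw
    have h1 : (List.dropWhile PySem.Chars.isspace raw).reverse.getLast? = some b := by
      rw [← hw, List.getLast?_append, List.getLast?_concat]; rfl
    rw [List.getLast?_reverse, List.head?_eq_some_head hune] at h1
    have h2 := List.head_dropWhile_not PySem.Chars.isspace hune
    rw [hcat, List.getLast?_concat]
    simp only [Option.some.injEq] at h1
    rw [h1] at h2
    simpa using h2
  · rw [hs, List.getLast?_reverse, List.head?_eq_some_head hvne]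
    simpa using List.head_dropWhile_not PySem.Chars.isspace hvne

lemma pv_grp_ne_nil : ∀ (t : List (List Char)) (cur : List (List Char)), cur ≠ [] → pvGrp t cur ≠ [] := by
  intro t
  induction t with
  | nil => intro cur hc; simp [pvGrp, hc]
  | cons l t ih =>
    intro cur hc
    by_cases hl : l = []
    · simp [pvGrp, hl, hc]
    · simpa [pvGrp, hl] using ih (cur ++ [l]) (by simp)

lemma pv_grp_skip : ∀ (t : List (List Char)),
    pvGrp (t.dropWhile (fun l => l.isEmpty)) [] = pvGrp t [] := by
  intro t
  induction t with
  | nil => simp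
  | cons l t ih =>
    by_cases hl : l = []
    · simpa [pvGrp, hl] using ih
    · simp [pvGrp, hl, List.isEmpty_iff]

lemma pv_dedup_true : ∀ (t : List (List Char)),
    pvDedup t true = pvDedup (t.dropWhile (fun l => l.isEmpty)) false := by
  intro t
  induction t with
  | nil => simp [pvDedup]
  | cons l t ih =>
    by_cases hl : l = []
    · simpa [pvDedup, hl] using ih
    · simp [pvDedup, hl, List.isEmpty_iff]

lemma pv_dedup_block : ∀ (blk rest : List (List Char)), (∀ l ∈ blk, l ≠ []) →
    pvDedup (blk ++ rest) false = blk ++ pvDedup rest false := by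
  intro blk
  induction blk with
  | nil => simp
  | cons l t ih =>
    intro rest h
    have hl := h l (by simp)
    simp [pvDedup, hl, ih rest (fun x hx => h x (by simp [hx]))]

lemma pv_grp_block : ∀ (blk : List (List Char)) (rest cur : List (List Char)), (∀ l ∈ blk, l ≠ []) →
    pvGrp (blk ++ rest) cur = pvGrp rest (cur ++ blk) := by
  intro blk
  induction blk with
  | nil => simp
  | cons l t ih =>
    intro rest cur h
    have hl := h l (by simp)
    simp [pvGrp, hl, ih rest (cur ++ [l]) (fun x hx => h x (by simp [hx]))]

lemma pv_ok_join (sep : List Char) : ∀ (gs : List (List Char)), gs ≠ [] → (∀ g ∈ gs, pvOk g) →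
    pvOk (PySem.Chars.join sep gs) := by
  intro gs
  induction gs with
  | nil => intro h; exact absurd rfl h
  | cons g r ih =>
    intro _ hok
    obtain ⟨hgne, hghd, hglast⟩ := hok g (by simp)
    cases r with
    | nil => simpa [PySem.Chars.join_singleton] using hok g (by simp)
    | cons q t =>
      obtain ⟨hrne, hrhd, hrlast⟩ := ih (by simp) (fun x hx => hok x (by simp [hx]))
      rw [PySem.Chars.join_cons_cons]
      refine ⟨by simp [hgne], ?_, ?_⟩
      · rw [List.append_assoc, List.head?_append]
        obtain ⟨c, cs, rfl⟩ := List.exists_cons_of_ne_nil hgne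
        simpa using hghd
      · rw [List.getLast?_append]
        obtain ⟨l', b, hcat⟩ := (PySem.Chars.join sep (q :: t)).eq_nil_or_concat.resolve_left hrne
        rw [List.concat_eq_append] at hcat
        rw [hcat] at hrlast ⊢
        simp only [List.getLast?_concat] at hrlast ⊢
        simpa using hrlast

lemma pv_join_append_empty : ∀ (blk : List (List Char)), blk ≠ [] →
    PySem.Chars.join ['\n'] (blk ++ [[]]) = PySem.Chars.join ['\n'] blk ++ ['\n'] := by
  intro blk
  induction blk with
  | nil => simp
  | cons g t ih =>
    intro _
    cases t with
    | nil => simp [PySem.Chars.join_cons_cons, PySem.Chars.join_singleton]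
    | cons g' r =>
      simp only [PySem.Chars.join_cons_cons, List.cons_append, List.append_assoc]
      simpa using ih (by simp)

lemma pv_join_mid : ∀ (blk d : List (List Char)), blk ≠ [] → d ≠ [] →
    PySem.Chars.join ['\n'] (blk ++ [] :: d)
      = PySem.Chars.join ['\n'] blk ++ '\n' :: '\n' :: PySem.Chars.join ['\n'] d := by
  intro blk d
  induction blk with
  | nil => simp
  | cons g t ih =>
    intro _ hd
    cases t with
    | nil =>
      cases d with
      | nil => exact absurd rfl hd
      | cons x r => simp [PySem.Chars.join_cons_cons, PySem.Chars.join_singleton]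
    | cons g' r =>
      simp only [PySem.Chars.join_cons_cons, List.cons_append, List.append_assoc]
      simpa using ih (by simp) hd

lemma pv_strip_opt (e₁ e₂ : Bool) (core : List Char) (h : pvOk core) :
    PySem.Chars.strip (pvOpt e₁ ++ core ++ pvOpt e₂) = core := by
  obtain ⟨hne, hhd, hlast⟩ := h
  obtain ⟨c, cs, hcons⟩ := List.exists_cons_of_ne_nil hne
  obtain ⟨l', b, hcat⟩ := core.eq_nil_or_concat.resolve_left hne
  rw [List.concat_eq_append] at hcat
  have hc : PySem.Chars.isspace c = false := by
    rw [hcons] at hhd; simpa using hhd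
  have hb : PySem.Chars.isspace b = false := by
    rw [hcat] at hlast; simp only [List.getLast?_concat] at hlast; simpa using hlast
  have hnl : PySem.Chars.isspace '\n' = true := by decide
  simp only [PySem.Chars.strip, PySem.Chars.lstrip, PySem.Chars.rstrip]
  have h1 : List.dropWhile PySem.Chars.isspace (pvOpt e₁ ++ core ++ pvOpt e₂)
      = core ++ pvOpt e₂ := by
    cases e₁ <;> rw [hcons] <;>
      simp [pvOpt, hnl, hc]
  rw [h1]
  have h2 : (core ++ pvOpt e₂).reverse = pvOpt e₂ ++ (b :: l'.reverse) := by
    rw [hcat]; cases e₂ <;> simp [pvOpt]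
  rw [h2]
  have h3 : List.dropWhile PySem.Chars.isspace (pvOpt e₂ ++ (b :: l'.reverse))
      = b :: l'.reverse := by
    cases e₂ <;> simp [pvOpt, hnl, hb]
  rw [h3, hcat]
  simp

lemma pv_main : ∀ (n : Nat) (ls : List (List Char)), ls.length ≤ n →
    (∀ l ∈ ls, l = [] ∨ pvOk l) →
    (∀ g ∈ pvGrp ls [], pvOk g) ∧
    ∃ e₁ e₂ : Bool,
      PySem.Chars.join ['\n'] (pvDedup ls false)
        = pvOpt e₁ ++ PySem.Chars.join ['\n', '\n'] (pvGrp ls []) ++ pvOpt e₂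
      ∧ ((∀ l, ls.head? = some l → l ≠ []) → e₁ = false)
      ∧ (pvGrp ls [] = [] → e₁ = false ∧ e₂ = false) := by
  intro n
  induction n with
  | zero =>
    intro ls hlen _
    have hnl : ls = [] := List.eq_nil_of_length_eq_zero (Nat.le_zero.mp hlen)
    subst hnl
    exact ⟨by simp [pvGrp], false, false,
      by simp [pvDedup, pvGrp, pvOpt, PySem.Chars.join_nil],
      fun _ => rfl, fun _ => ⟨rfl, rfl⟩⟩
  | succ n ih =>
    intro ls hlen hok
    cases ls with
    | nil =>
      exact ⟨by simp [pvGrp], false, false,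
        by simp [pvDedup, pvGrp, pvOpt, PySem.Chars.join_nil],
        fun _ => rfl, fun _ => ⟨rfl, rfl⟩⟩
    | cons l t =>
      by_cases hl : l = []
      · subst hl
        have hgs : pvGrp ([] :: t) [] = pvGrp (t.dropWhile (fun l => l.isEmpty)) [] := by
          rw [pv_grp_skip]; simp [pvGrp]
        have hdd : pvDedup ([] :: t) false
            = [] :: pvDedup (t.dropWhile (fun l => l.isEmpty)) false := by
          simp [pvDedup, pv_dedup_true]
        have hlen' : (t.dropWhile (fun l => l.isEmpty)).length ≤ n :=
          le_trans (List.length_dropWhile_le _ _) (by simpa using Nat.le_of_succ_le_succ hlen)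
        have hok' : ∀ x ∈ t.dropWhile (fun l => l.isEmpty), x = [] ∨ pvOk x :=
          fun x hx => hok x (List.mem_cons_of_mem _ ((List.dropWhile_suffix _).subset hx))
        obtain ⟨hgok, e₁', e₂', hj, hhd, hnil⟩ := ih _ hlen' hok'
        rw [hgs, hdd]
        cases hc : t.dropWhile (fun l => l.isEmpty) with
        | nil =>
          refine ⟨by simp [pvGrp], false, false, ?_, fun _ => rfl, fun _ => ⟨rfl, rfl⟩⟩
          simp [pvDedup, pvGrp, pvOpt, PySem.Chars.join_singleton, PySem.Chars.join_nil]
        | cons l' r =>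
          have hne : t.dropWhile (fun l => l.isEmpty) ≠ [] := by rw [hc]; simp
          have hl' : l' ≠ [] := by
            have hh := List.head_dropWhile_not (fun l : List Char => l.isEmpty) hne
            have h2 : (t.dropWhile (fun l => l.isEmpty)).head hne = l' := by simp [hc]
            rw [h2] at hh
            simpa [List.isEmpty_iff] using hh
          rw [hc] at hgok hj hhd hnil
          have he₁ : e₁' = false := hhd (by
            intro x hx
            simp only [List.head?_cons, Option.some.injEq] at hx
            exact hx ▸ hl')
          have hgne : pvGrp (l' :: r) [] ≠ [] := by
            have h1 : pvGrp (l' :: r) [] = pvGrp r [l'] := by simp [pvGrp, hl']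
            rw [h1]
            exact pv_grp_ne_nil r [l'] (by simp)
          have hddc : pvDedup (l' :: r) false = l' :: pvDedup r false := by
            simp [pvDedup, hl']
          refine ⟨hgok, true, e₂', ?_, ?_, ?_⟩
          · have hdne : pvDedup (l' :: r) false ≠ [] := by rw [hddc]; simp
            obtain ⟨d0, drest, hdeq⟩ := List.exists_cons_of_ne_nil hdne
            rw [hdeq, PySem.Chars.join_cons_cons, ← hdeq, hj, he₁]
            simp [pvOpt]
          · intro hcond; exact absurd (hcond [] rfl) (fun h => h rfl)
          · intro hgnil; exact absurd hgnil hgne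
      · -- a maximal block of non-empty lines at the front
        have hP : (fun x : List Char => !x.isEmpty) l = true := by
          simp only [Bool.not_eq_true', List.isEmpty_eq_false_iff]
          exact hl
        have hsplit : (l :: t).takeWhile (fun x => !x.isEmpty)
            ++ (l :: t).dropWhile (fun x => !x.isEmpty) = l :: t :=
          List.takeWhile_append_dropWhile
        have hblkne : (l :: t).takeWhile (fun x => !x.isEmpty) ≠ [] := by
          simp only [List.takeWhile_cons, hP, if_true]
          simp
        have hblknon : ∀ x ∈ (l :: t).takeWhile (fun x => !x.isEmpty), x ≠ [] := by
          intro x hx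
          have := List.mem_takeWhile_imp hx
          simpa [List.isEmpty_iff] using this
        have hblkok : ∀ x ∈ (l :: t).takeWhile (fun x => !x.isEmpty), pvOk x := by
          intro x hx
          rcases hok x ((List.takeWhile_prefix _).subset hx) with h | h
          · exact absurd h (hblknon x hx)
          · exact h
        have hokjb : pvOk (PySem.Chars.join ['\n'] ((l :: t).takeWhile (fun x => !x.isEmpty))) :=
          pv_ok_join _ _ hblkne hblkok
        have hdd := pv_dedup_block _ ((l :: t).dropWhile (fun x => !x.isEmpty)) hblknon
        rw [hsplit] at hdd
        have hgg := pv_grp_block _ ((l :: t).dropWhile (fun x => !x.isEmpty)) [] hblknon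
        rw [hsplit, List.nil_append] at hgg
        cases hr : (l :: t).dropWhile (fun x => !x.isEmpty) with
        | nil =>
          rw [hr] at hdd hgg
          rw [hdd, hgg]
          refine ⟨?_, false, false, ?_, fun _ => rfl, ?_⟩
          · intro g hg
            simp only [pvGrp, hblkne, ne_eq, not_false_iff, if_true, List.mem_singleton] at hg
            rw [hg]; exact hokjb
          · simp [pvGrp, hblkne, pvOpt, PySem.Chars.join_singleton, pvDedup]
          · intro hgnil
            exact absurd hgnil (by simp [pvGrp, hblkne])
        | cons r0 r =>
          have hrne : (l :: t).dropWhile (fun x => !x.isEmpty) ≠ [] := by rw [hr]; simp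
          have hr0 : r0 = [] := by
            have hh := List.head_dropWhile_not (fun x : List Char => !x.isEmpty) hrne
            have h2 : ((l :: t).dropWhile (fun x => !x.isEmpty)).head hrne = r0 := by simp [hr]
            rw [h2] at hh
            simpa [List.isEmpty_iff] using hh
          subst hr0
          have hlenr : (r.dropWhile (fun l => l.isEmpty)).length ≤ n := by
            have h1 := congrArg List.length hsplit
            rw [hr] at h1
            simp only [List.length_append, List.length_cons] at h1
            have h2 : 1 ≤ ((l :: t).takeWhile (fun x => !x.isEmpty)).length :=
              List.length_pos_of_ne_nil hblkne
            have h3 := List.length_dropWhile_le (fun l : List Char => l.isEmpty) r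
            have h4 : (l :: t).length ≤ n + 1 := hlen
            simp only [List.length_cons] at h4
            omega
          have hok' : ∀ x ∈ r.dropWhile (fun l => l.isEmpty), x = [] ∨ pvOk x := by
            intro x hx
            apply hok
            have hx1 : x ∈ ([] :: r) :=
              List.mem_cons_of_mem _ ((List.dropWhile_suffix _).subset hx)
            rw [← hsplit, hr]
            exact List.mem_append_right _ hx1
          obtain ⟨hgok', e₁', e₂', hj', hhd', hnil'⟩ := ih _ hlenr hok'
          have hdd2 : pvDedup ([] :: r) false
              = [] :: pvDedup (r.dropWhile (fun l => l.isEmpty)) false := by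
            simp [pvDedup, pv_dedup_true]
          have hgg2 : pvGrp ([] :: r) ((l :: t).takeWhile (fun x => !x.isEmpty))
              = PySem.Chars.join ['\n'] ((l :: t).takeWhile (fun x => !x.isEmpty))
                :: pvGrp (r.dropWhile (fun l => l.isEmpty)) [] := by
            rw [pv_grp_skip]
            simp [pvGrp, hblkne]
          rw [hr] at hdd hgg
          rw [hdd, hdd2, hgg, hgg2]
          cases hc2 : r.dropWhile (fun l => l.isEmpty) with
          | nil =>
            refine ⟨?_, false, true, ?_, fun _ => rfl, ?_⟩
            · intro g hg
              have h0 : pvGrp ([] : List (List Char)) [] = [] := by simp [pvGrp]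
              rw [h0] at hg
              simp only [List.mem_singleton] at hg
              rw [hg]; exact hokjb
            · have h0 : pvDedup ([] : List (List Char)) false = [] := rfl
              rw [h0, pv_join_append_empty _ hblkne]
              simp [pvGrp, pvOpt, PySem.Chars.join_singleton]
            · intro hgnil; exact absurd hgnil (by simp)
          | cons l'' r'' =>
            have hne2 : r.dropWhile (fun l => l.isEmpty) ≠ [] := by rw [hc2]; simp
            have hl'' : l'' ≠ [] := by
              have hh := List.head_dropWhile_not (fun l : List Char => l.isEmpty) hne2
              have h2 : (r.dropWhile (fun l => l.isEmpty)).head hne2 = l'' := by simp [hc2]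
              rw [h2] at hh
              simpa [List.isEmpty_iff] using hh
            rw [hc2] at hgok' hj' hhd' hnil'
            have he₁ : e₁' = false := hhd' (by
              intro x hx
              simp only [List.head?_cons, Option.some.injEq] at hx
              exact hx ▸ hl'')
            have hgne : pvGrp (l'' :: r'') [] ≠ [] := by
              have h1 : pvGrp (l'' :: r'') [] = pvGrp r'' [l''] := by simp [pvGrp, hl'']
              rw [h1]
              exact pv_grp_ne_nil r'' [l''] (by simp)
            have hdne : pvDedup (l'' :: r'') false ≠ [] := by simp [pvDedup, hl'']
            refine ⟨?_, false, e₂', ?_, fun _ => rfl, ?_⟩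
            · intro g hg
              rcases List.mem_cons.mp hg with hg | hg
              · rw [hg]; exact hokjb
              · exact hgok' g hg
            · rw [pv_join_mid _ _ hblkne hdne, hj', he₁]
              obtain ⟨g0, grest, hgeq⟩ := List.exists_cons_of_ne_nil hgne
              rw [hgeq, PySem.Chars.join_cons_cons, ← hgeq]
              simp [pvOpt]
            · intro hgnil; exact absurd hgnil (by simp)

lemma pv_cleaned_eq (ls : List (List Char)) (h : ∀ l ∈ ls, l = [] ∨ pvOk l) :
    PySem.Chars.strip (PySem.Chars.join ['\n'] (pvDedup ls false))
      = PySem.Chars.join ['\n', '\n'] (pvGrp ls []) := by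
  obtain ⟨hgok, e₁, e₂, hj, -, hnil⟩ := pv_main ls.length ls le_rfl h
  rw [hj]
  cases hgs : pvGrp ls [] with
  | nil =>
    obtain ⟨h1, h2⟩ := hnil hgs
    subst h1; subst h2
    simp [pvOpt, PySem.Chars.join_nil, PySem.Chars.strip, PySem.Chars.lstrip,
      PySem.Chars.rstrip]
  | cons g gs' =>
    rw [← hgs]
    exact pv_strip_opt e₁ e₂ _
      (pv_ok_join _ _ (by rw [hgs]; simp) (by rw [hgs]; exact hgs ▸ hgok))

-- ===== VERDICT (by name: the statement is the Claim_ definition above) =====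
theorem clean_cv_text_py_spec : Claim_equal_clean_cv_text_py := by
  intro cv_text max_chars _
  unfold Spec_clean_cv_text_py
  have hok : ∀ l ∈ (PySem.Chars.splitlines cv_text.toList).map PySem.Chars.strip,
      l = [] ∨ pvOk l := by
    intro l hl
    rcases List.mem_map.mp hl with ⟨raw, _, rfl⟩
    exact pv_ok_strip raw
  have key := pv_cleaned_eq ((PySem.Chars.splitlines cv_text.toList).map PySem.Chars.strip) hok
  simp only [clean_cv_text_py, clean_cv_text_py_alt]
  rw [pv_foldA, pv_foldB, List.nil_append, List.nil_append, key]
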